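-- pv_equiv track=rewrite | github.com/Arraytionary/backEndHw_1 | Utils/oject_utils.py | seek_part
-- ===== SOURCE A (Python) =====
-- def seek_part(targetByte,listFile):
--     for i in range(len(listFile)):
--         if targetByte - listFile[i] > 0:
--             targetByte -= listFile[i]
--         # elif targetByte - listFile[i] == 0:
--         #     return i+1,0 # if i > len
--         else:
--             if i == 0:
--                 return i,targetByte
--             else:
--                 return i,targetByte - 1
-- ===== SOURCE B (Python) =====
-- def seek_part(targetByte, listFile):
--     # Precompute (sum-before, sum-through) for each part, then scan the
--     # cumulative table; the original target is never mutated.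
--     acc = 0
--     steps = []
--     for n in listFile:
--         steps.append((acc, acc + n))
--         acc += n
--     for i, (before, through) in enumerate(steps):
--         if targetByte <= through:
--             return (i, targetByte - before - (1 if i else 0))
--     return None
-- ===== Notes on version B (the rewrite author's own statement) =====
-- stated objective: alternative
-- what changed: B precomputes a cumulative-sum table once and finds the stopping index by a pure scan over it with a closed-form remainder, instead of A's destructive loop that repeatedly mutates targetByte and branches on i==0.
import Mathlib
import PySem

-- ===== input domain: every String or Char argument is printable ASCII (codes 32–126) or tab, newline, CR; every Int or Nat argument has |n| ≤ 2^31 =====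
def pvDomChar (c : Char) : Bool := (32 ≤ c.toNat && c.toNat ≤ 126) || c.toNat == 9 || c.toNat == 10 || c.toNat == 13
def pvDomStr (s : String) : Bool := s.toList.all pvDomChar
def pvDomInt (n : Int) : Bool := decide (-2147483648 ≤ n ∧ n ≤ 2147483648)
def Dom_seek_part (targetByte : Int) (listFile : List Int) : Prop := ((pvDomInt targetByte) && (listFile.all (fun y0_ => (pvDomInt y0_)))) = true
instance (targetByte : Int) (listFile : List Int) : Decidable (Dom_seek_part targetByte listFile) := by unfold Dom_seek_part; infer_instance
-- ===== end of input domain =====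

-- B precomputes a cumulative-sum table and scans it with a closed-form remainder,
-- instead of A's destructive subtraction loop; same cost, different structure.


-- ===== PORT A =====
-- the `for i in range(len(listFile))` loop, walking the list with its index;
-- `targetByte` is the mutated loop variable
def seekPartGo (targetByte : Int) (listFile : List Int) (i : Nat) : Option (Int × Int) :=
  match listFile with
  | [] => none
  | n :: rest =>
      if targetByte - n > 0 then
        seekPartGo (targetByte - n) rest (i + 1)
      else
        if i = 0 then some ((i : Int), targetByte)
        else some ((i : Int), targetByte - 1)

def seek_part (targetByte : Int) (listFile : List Int) : Option (Int × Int) :=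
  seekPartGo targetByte listFile 0

-- ===== PORT B =====
-- first loop of Source B: build steps = [(sum before i, sum through i)], acc running
def seekPartSteps (acc : Int) (listFile : List Int) (steps : List (Int × Int)) :
    Int × List (Int × Int) :=
  match listFile with
  | [] => (acc, steps)
  | n :: rest => seekPartSteps (acc + n) rest (steps ++ [(acc, acc + n)])

-- second loop of Source B: `for i, (before, through) in enumerate(steps)`
def seekPartFind (targetByte : Int) (steps : List (Int × Int)) (i : Nat) :
    Option (Int × Int) :=
  match steps with
  | [] => none
  | (before, through) :: rest =>
      if targetByte ≤ through then
        some ((i : Int), targetByte - before - (if i = 0 then 0 else 1))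
      else seekPartFind targetByte rest (i + 1)

def seek_part_alt (targetByte : Int) (listFile : List Int) : Option (Int × Int) :=
  seekPartFind targetByte (seekPartSteps 0 listFile []).2 0

-- ===== PRECONDITION & SPEC =====
def Spec_seek_part (targetByte : Int) (listFile : List Int) (out : Option (Int × Int)) : Prop := out = seek_part_alt targetByte listFile
instance (targetByte : Int) (listFile : List Int) (out : Option (Int × Int)) : Decidable (Spec_seek_part targetByte listFile out) := by unfold Spec_seek_part; infer_instance

-- ===== CLAIM (what is proved, stated in full; the proofs are below) =====
def Claim_equal_seek_part : Prop := ∀ (targetByte : Int) (listFile : List Int), Dom_seek_part targetByte listFile → Spec_seek_part targetByte listFile (seek_part targetByte listFile)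

-- ===== LEMMAS AND PROOFS =====

-- the steps table built from running prefix `a`, in direct recursive form
def stepsFrom (a : Int) : List Int → List (Int × Int)
  | [] => []
  | n :: rest => (a, a + n) :: stepsFrom (a + n) rest

theorem seekPartSteps_eq (listFile : List Int) :
    ∀ (acc : Int) (steps : List (Int × Int)),
      (seekPartSteps acc listFile steps).2 = steps ++ stepsFrom acc listFile := by
  induction listFile with
  | nil => intro acc steps; simp [seekPartSteps, stepsFrom]
  | cons n rest ih =>
      intro acc steps
      simp [seekPartSteps, stepsFrom, ih, List.append_assoc]

theorem go_eq_find (listFile : List Int) :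
    ∀ (i : Nat) (t a : Int),
      seekPartGo (t - a) listFile i = seekPartFind t (stepsFrom a listFile) i := by
  induction listFile with
  | nil => intro i t a; simp [seekPartGo, stepsFrom, seekPartFind]
  | cons n rest ih =>
      intro i t a
      simp only [seekPartGo, stepsFrom, seekPartFind]
      by_cases h : t - a - n > 0
      · rw [if_pos h, if_neg (by omega)]
        have : t - a - n = t - (a + n) := by ring
        rw [this, ih]
      · rw [if_neg h, if_pos (show t ≤ a + n by omega)]
        split_ifs with hi <;> simp

-- ===== VERDICT (by name: the statement is the Claim_ definition above) =====
theorem seek_part_spec : Claim_equal_seek_part := by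
  intro t l _
  unfold Spec_seek_part seek_part seek_part_alt
  rw [seekPartSteps_eq, List.nil_append]
  have := go_eq_find l 0 t 0
  simpa using this
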